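-- pv_equiv track=rewrite | github.com/tecknork/AttGAN-Tensorflow | data.py | check_attribute_conflict
-- ===== SOURCE A (Python) =====
-- def check_attribute_conflict(att_batch, att_name, att_names):
--     def _set(att, value, att_name):
--         if att_name in att_names:
--             att[att_names.index(att_name)] = value
--
--     idx = att_names.index(att_name)
--
--     for att in att_batch:
--         if att_name in ['Bald', 'Receding_Hairline'] and att[idx] == 1:
--             _set(att, 0, 'Bangs')
--         elif att_name == 'Bangs' and att[idx] == 1:
--             _set(att, 0, 'Bald')
--             _set(att, 0, 'Receding_Hairline')
--         elif att_name in ['Black_Hair', 'Blond_Hair', 'Brown_Hair', 'Gray_Hair'] and att[idx] == 1: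
--             for n in ['Black_Hair', 'Blond_Hair', 'Brown_Hair', 'Gray_Hair']:
--                 if n != att_name:
--                     _set(att, 0, n)
--         elif att_name in ['Straight_Hair', 'Wavy_Hair'] and att[idx] == 1:
--             for n in ['Straight_Hair', 'Wavy_Hair']:
--                 if n != att_name:
--                     _set(att, 0, n)
--         # elif att_name in ['Mustache', 'No_Beard'] and att[idx] == 1:  # enable this part help to learn `Mustache`
--         #     for n in ['Mustache', 'No_Beard']:
--         #         if n != att_name:
--         #             _set(att, 0, n)
--
--     return att_batch
-- ===== SOURCE B (Python) =====
-- # Mutual-exclusion groups + column mask + elementwise row rebuild, instead of A's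
-- # if/elif dispatch with targeted in-place writes. A mutates rows of att_batch in
-- # place; B builds fresh rows -- the returned value is identical.
-- _GROUPS = [('Bald', 'Bangs'), ('Receding_Hairline', 'Bangs'),
--            ('Black_Hair', 'Blond_Hair', 'Brown_Hair', 'Gray_Hair'),
--            ('Straight_Hair', 'Wavy_Hair')]
--
--
-- def check_attribute_conflict(att_batch, att_name, att_names):
--     idx = att_names.index(att_name)
--     conflicts = set()
--     for g in _GROUPS:
--         if att_name in g:
--             conflicts.update(n for n in g if n != att_name)
--     mask = {att_names.index(n) for n in conflicts if n in att_names}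
--     if not mask:
--         return att_batch
--     return [[0 if j in mask else v for j, v in enumerate(att)] if att[idx] == 1 else att
--             for att in att_batch]
-- ===== Notes on version B (the rewrite author's own statement) =====
-- stated objective: alternative
-- what changed: Replaced A's four-way if/elif dispatch with per-branch targeted index writes by a declarative list of mutual-exclusion groups from which a set of conflicting names is unioned, a column-index mask built once from it, and one pass that rebuilds each triggered row elementwise against the mask.
import Mathlib
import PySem

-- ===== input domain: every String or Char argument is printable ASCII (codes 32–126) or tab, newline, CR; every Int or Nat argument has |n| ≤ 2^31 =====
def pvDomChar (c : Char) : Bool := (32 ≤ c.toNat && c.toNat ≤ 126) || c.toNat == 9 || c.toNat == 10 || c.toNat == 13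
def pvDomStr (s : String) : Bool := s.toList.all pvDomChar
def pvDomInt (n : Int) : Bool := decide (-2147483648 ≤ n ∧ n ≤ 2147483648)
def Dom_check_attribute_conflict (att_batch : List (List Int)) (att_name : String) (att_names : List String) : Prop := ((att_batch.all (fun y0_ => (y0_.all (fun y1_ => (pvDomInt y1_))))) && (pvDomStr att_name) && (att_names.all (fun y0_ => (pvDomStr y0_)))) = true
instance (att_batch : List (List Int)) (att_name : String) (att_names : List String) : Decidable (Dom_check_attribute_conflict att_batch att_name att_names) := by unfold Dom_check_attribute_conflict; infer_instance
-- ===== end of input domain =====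

-- B replaces A's if/elif dispatch with per-branch targeted writes by: mutual-exclusion GROUPS, a column-index MASK
-- computed once, and an elementwise rebuild of each triggered row (objective: alternative). A mutates the rows of
-- att_batch in place and returns the same object; B builds fresh rows — the equivalence proved here is about the
-- RETURN value only.

-- ===== PORT A =====
-- the inner helper `_set`; `att[i] = v` is List.set
-- (in range under Pre_; where Python would raise IndexError the input is excluded by Pre_)
def pvSet (att_names : List String) (att : List Int) (value : Int) (name : String) : List Int :=
  if name ∈ att_names then att.set ((PySem.List.index? att_names name).getD 0) value else att

-- literal port of A; `att[idx]` is getD (in range under Pre_); ValueError of .index excluded by Pre_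
def check_attribute_conflict (att_batch : List (List Int)) (att_name : String) (att_names : List String) : List (List Int) :=
  let idx := (PySem.List.index? att_names att_name).getD 0
  att_batch.map (fun att =>
    if att_name ∈ ["Bald", "Receding_Hairline"] ∧ att.getD idx 0 = 1 then
      pvSet att_names att 0 "Bangs"
    else if att_name = "Bangs" ∧ att.getD idx 0 = 1 then
      pvSet att_names (pvSet att_names att 0 "Bald") 0 "Receding_Hairline"
    else if att_name ∈ ["Black_Hair", "Blond_Hair", "Brown_Hair", "Gray_Hair"] ∧ att.getD idx 0 = 1 then
      ["Black_Hair", "Blond_Hair", "Brown_Hair", "Gray_Hair"].foldl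
        (fun a n => if n ≠ att_name then pvSet att_names a 0 n else a) att
    else if att_name ∈ ["Straight_Hair", "Wavy_Hair"] ∧ att.getD idx 0 = 1 then
      ["Straight_Hair", "Wavy_Hair"].foldl
        (fun a n => if n ≠ att_name then pvSet att_names a 0 n else a) att
    else att)

-- ===== PORT B =====
def pvGroups : List (List String) :=
  [["Bald", "Bangs"], ["Receding_Hairline", "Bangs"],
   ["Black_Hair", "Blond_Hair", "Brown_Hair", "Gray_Hair"],
   ["Straight_Hair", "Wavy_Hair"]]

-- the `conflicts` set of Source B (a Python set; consumed only by membership / building another set)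
def pvConflicts (att_name : String) : PySem.Set String :=
  pvGroups.foldl
    (fun s g => if att_name ∈ g then PySem.Set.update s (g.filter (fun n => n ≠ att_name)) else s)
    PySem.Set.empty

def check_attribute_conflict_alt (att_batch : List (List Int)) (att_name : String) (att_names : List String) : List (List Int) :=
  let idx := (PySem.List.index? att_names att_name).getD 0
  let conflicts := pvConflicts att_name
  let mask : PySem.Set Int := PySem.Set.ofList
    ((conflicts.filter (fun n => n ∈ att_names)).map
      (fun n => (((PySem.List.index? att_names n).getD 0 : Nat) : Int)))
  if mask = [] then att_batch
  else att_batch.map (fun att =>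
    if att.getD idx 0 = 1 then
      (PySem.List.enumerate att).map (fun p => if p.1 ∈ mask then (0 : Int) else p.2)
    else att)

-- ===== PRECONDITION & SPEC =====
-- the names whose row triggers zeroing (used only to STATE Pre_, independent of both ports)
def pvConf (att_name : String) : List String :=
  if att_name ∈ ["Bald", "Receding_Hairline"] then ["Bangs"]
  else if att_name = "Bangs" then ["Bald", "Receding_Hairline"]
  else if att_name ∈ ["Black_Hair", "Blond_Hair", "Brown_Hair", "Gray_Hair"] then
    ["Black_Hair", "Blond_Hair", "Brown_Hair", "Gray_Hair"].filter (· ≠ att_name)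
  else if att_name ∈ ["Straight_Hair", "Wavy_Hair"] then
    ["Straight_Hair", "Wavy_Hair"].filter (· ≠ att_name)
  else []

-- Pre_ = exactly the inputs where Python A returns: att_name is in att_names (else ValueError), and whenever a row
-- is read/written (only for the nine conflict-bearing names) the indices used are inside the row (else IndexError).
def Pre_check_attribute_conflict (att_batch : List (List Int)) (att_name : String) (att_names : List String) : Prop :=
  att_name ∈ att_names ∧
  ∀ att ∈ att_batch, pvConf att_name ≠ [] →
    (PySem.List.index? att_names att_name).getD 0 < att.length ∧
    (att.getD ((PySem.List.index? att_names att_name).getD 0) 0 = 1 →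
      ∀ n ∈ pvConf att_name, n ∈ att_names → (PySem.List.index? att_names n).getD 0 < att.length)
instance (att_batch : List (List Int)) (att_name : String) (att_names : List String) : Decidable (Pre_check_attribute_conflict att_batch att_name att_names) := by unfold Pre_check_attribute_conflict; infer_instance

def pvWitness_check_attribute_conflict : List (List Int) × String × List String :=
  ([[1, 0], [0, 1]], "Bald", ["Bald", "Bangs"])

def Spec_check_attribute_conflict (att_batch : List (List Int)) (att_name : String) (att_names : List String) (out : List (List Int)) : Prop := out = check_attribute_conflict_alt att_batch att_name att_names
instance (att_batch : List (List Int)) (att_name : String) (att_names : List String) (out : List (List Int)) : Decidable (Spec_check_attribute_conflict att_batch att_name att_names out) := by unfold Spec_check_attribute_conflict; infer_instance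

-- ===== CLAIM (what is proved, stated in full; the proofs are below) =====
def Claim_equal_check_attribute_conflict : Prop := ∀ (att_batch : List (List Int)) (att_name : String) (att_names : List String), Dom_check_attribute_conflict att_batch att_name att_names → Pre_check_attribute_conflict att_batch att_name att_names → Spec_check_attribute_conflict att_batch att_name att_names (check_attribute_conflict att_batch att_name att_names)

-- ===== LEMMAS AND PROOFS =====

-- getElem? of a fold of A's `_set` writes: position i is zeroed iff some name of ns is present with first index i
theorem getA? (att_names : List String) (ns : List String) (att : List Int) (i : Nat) :
    (ns.foldl (fun a n => pvSet att_names a 0 n) att)[i]?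
      = if ∃ n ∈ ns, n ∈ att_names ∧ (PySem.List.index? att_names n).getD 0 = i
        then att[i]?.map (fun _ => (0 : Int)) else att[i]? := by
  induction ns generalizing att with
  | nil => simp
  | cons n ns ih =>
    simp only [List.foldl_cons, ih]
    by_cases hn : n ∈ att_names
    · by_cases hk : (PySem.List.index? att_names n).getD 0 = i
      · have hk' : (List.idxOf? n att_names).getD 0 = i := by
          rw [← PySem.List.index?_eq_idxOf?]; exact hk
        have hset : (pvSet att_names att 0 n)[i]? = att[i]?.map (fun _ => (0 : Int)) := by
          simp only [pvSet, if_pos hn, PySem.List.index?_eq_idxOf?, List.getElem?_set, hk']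
          by_cases hi : i < att.length
          · simp [hi]
          · simp [hi]
        rw [hset]
        have hex : ∃ m ∈ n :: ns, m ∈ att_names ∧ (PySem.List.index? att_names m).getD 0 = i :=
          ⟨n, List.mem_cons_self, hn, hk⟩
        rw [if_pos hex]
        split_ifs <;> cases att[i]? <;> simp
      · have hk' : ¬ (List.idxOf? n att_names).getD 0 = i := by
          rw [← PySem.List.index?_eq_idxOf?]; exact hk
        have hset : (pvSet att_names att 0 n)[i]? = att[i]? := by
          simp [pvSet, hn, hk']
        rw [hset]
        have hiff : (∃ m ∈ n :: ns, m ∈ att_names ∧ (PySem.List.index? att_names m).getD 0 = i)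
            ↔ (∃ m ∈ ns, m ∈ att_names ∧ (PySem.List.index? att_names m).getD 0 = i) := by
          constructor
          · rintro ⟨m, hm, h1, h2⟩
            rcases List.mem_cons.mp hm with rfl | hm'
            · exact absurd h2 hk
            · exact ⟨m, hm', h1, h2⟩
          · rintro ⟨m, hm, h1, h2⟩; exact ⟨m, List.mem_cons_of_mem _ hm, h1, h2⟩
        simp only [hiff]
    · have hset : pvSet att_names att 0 n = att := by simp [pvSet, hn]
      rw [hset]
      have hiff : (∃ m ∈ n :: ns, m ∈ att_names ∧ (PySem.List.index? att_names m).getD 0 = i)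
          ↔ (∃ m ∈ ns, m ∈ att_names ∧ (PySem.List.index? att_names m).getD 0 = i) := by
        constructor
        · rintro ⟨m, hm, h1, h2⟩
          rcases List.mem_cons.mp hm with rfl | hm'
          · exact absurd h1 hn
          · exact ⟨m, hm', h1, h2⟩
        · rintro ⟨m, hm, h1, h2⟩; exact ⟨m, List.mem_cons_of_mem _ hm, h1, h2⟩
      simp only [hiff]

-- the generic branch equivalence: a fold of `_set` over ns equals B's mask-driven elementwise rebuild
theorem branch_eq (att_names : List String) (ns : List String) (idx : Nat) (batch : List (List Int)) :
    batch.map (fun att =>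
        if att.getD idx 0 = 1 then ns.foldl (fun a n => pvSet att_names a 0 n) att else att)
      = (if (PySem.Set.ofList ((ns.filter (fun n => n ∈ att_names)).map
              (fun n => (((PySem.List.index? att_names n).getD 0 : Nat) : Int))) : PySem.Set Int) = [] then batch
         else batch.map (fun att =>
            if att.getD idx 0 = 1 then
              (PySem.List.enumerate att).map
                (fun p => if p.1 ∈ (PySem.Set.ofList ((ns.filter (fun n => n ∈ att_names)).map
                    (fun n => (((PySem.List.index? att_names n).getD 0 : Nat) : Int))) : PySem.Set Int)
                  then (0 : Int) else p.2)
            else att)) := by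
  set L := (ns.filter (fun n => n ∈ att_names)).map
      (fun n => (((PySem.List.index? att_names n).getD 0 : Nat) : Int)) with hL
  have memL : ∀ i : Nat, ((i : Int) ∈ (PySem.Set.ofList L : PySem.Set Int)
      ↔ ∃ n ∈ ns, n ∈ att_names ∧ (PySem.List.index? att_names n).getD 0 = i) := by
    intro i
    rw [PySem.Set.mem_ofList, hL]
    simp only [List.mem_map, List.mem_filter]
    constructor
    · rintro ⟨n, ⟨hn, hmem⟩, hcast⟩
      exact ⟨n, hn, by simpa using hmem, by exact_mod_cast hcast⟩
    · rintro ⟨n, hn, hmem, hidx⟩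
      exact ⟨n, ⟨hn, by simpa using hmem⟩, by exact_mod_cast hidx⟩
  by_cases hm : (PySem.Set.ofList L : PySem.Set Int) = []
  · -- mask empty: no name of ns occurs in att_names, every write is a no-op
    have hnone : ∀ n ∈ ns, n ∉ att_names := by
      intro n hn hmem
      have : ((((PySem.List.index? att_names n).getD 0 : Nat) : Int)) ∈ (PySem.Set.ofList L : PySem.Set Int) := by
        rw [memL]; exact ⟨n, hn, hmem, rfl⟩
      rw [hm] at this; simp at this
    have hfold : ∀ att : List Int, ns.foldl (fun a n => pvSet att_names a 0 n) att = att := by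
      intro att
      apply List.ext_getElem?
      intro i
      rw [getA? att_names ns att i, if_neg]
      rintro ⟨n, hn, hmem, -⟩
      exact hnone n hn hmem
    simp only [hm, hfold]
    simp
  · rw [if_neg hm]
    apply List.map_congr_left
    intro att _
    by_cases ht : att.getD idx 0 = 1
    · rw [if_pos ht, if_pos ht]
      apply List.ext_getElem?
      intro i
      rw [getA? att_names ns att i]
      rw [List.getElem?_map, PySem.List.getElem?_enumerate]
      by_cases hp : ∃ n ∈ ns, n ∈ att_names ∧ (PySem.List.index? att_names n).getD 0 = i
      · rw [if_pos hp]
        have hiL : ((i : Int) ∈ (PySem.Set.ofList L : PySem.Set Int)) := (memL i).mpr hp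
        rw [PySem.Set.mem_ofList] at hiL
        cases h : att[i]? <;> simp [hiL]
      · rw [if_neg hp]
        have hiL : ¬ ((i : Int) ∈ (PySem.Set.ofList L : PySem.Set Int)) := fun h => hp ((memL i).mp h)
        rw [PySem.Set.mem_ofList] at hiL
        cases h : att[i]? <;> simp [hiL]
    · rw [if_neg ht, if_neg ht]

-- the two ports in fact agree on EVERY input (both are totalisations of the same partial Python behaviour)
theorem ports_eq (att_batch : List (List Int)) (att_name : String) (att_names : List String) :
    check_attribute_conflict att_batch att_name att_names
      = check_attribute_conflict_alt att_batch att_name att_names := by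
  by_cases h1 : att_name = "Bald"
  · subst h1
    have hc : pvConflicts "Bald" = ["Bangs"] := by decide
    have g := branch_eq att_names ["Bangs"] ((PySem.List.index? att_names "Bald").getD 0) att_batch
    simp only [List.foldl_cons, List.foldl_nil] at g
    simp only [check_attribute_conflict, check_attribute_conflict_alt, hc]
    simpa using g
  by_cases h2 : att_name = "Receding_Hairline"
  · subst h2
    have hc : pvConflicts "Receding_Hairline" = ["Bangs"] := by decide
    have g := branch_eq att_names ["Bangs"] ((PySem.List.index? att_names "Receding_Hairline").getD 0) att_batch
    simp only [List.foldl_cons, List.foldl_nil] at g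
    simp only [check_attribute_conflict, check_attribute_conflict_alt, hc]
    simpa using g
  by_cases h3 : att_name = "Bangs"
  · subst h3
    have hc : pvConflicts "Bangs" = ["Bald", "Receding_Hairline"] := by decide
    have g := branch_eq att_names ["Bald", "Receding_Hairline"] ((PySem.List.index? att_names "Bangs").getD 0) att_batch
    simp only [List.foldl_cons, List.foldl_nil] at g
    simp only [check_attribute_conflict, check_attribute_conflict_alt, hc]
    simpa using g
  by_cases h4 : att_name = "Black_Hair"
  · subst h4
    have hc : pvConflicts "Black_Hair" = ["Blond_Hair", "Brown_Hair", "Gray_Hair"] := by decide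
    have g := branch_eq att_names ["Blond_Hair", "Brown_Hair", "Gray_Hair"] ((PySem.List.index? att_names "Black_Hair").getD 0) att_batch
    simp only [List.foldl_cons, List.foldl_nil] at g
    simp only [check_attribute_conflict, check_attribute_conflict_alt, hc]
    simpa using g
  by_cases h5 : att_name = "Blond_Hair"
  · subst h5
    have hc : pvConflicts "Blond_Hair" = ["Black_Hair", "Brown_Hair", "Gray_Hair"] := by decide
    have g := branch_eq att_names ["Black_Hair", "Brown_Hair", "Gray_Hair"] ((PySem.List.index? att_names "Blond_Hair").getD 0) att_batch
    simp only [List.foldl_cons, List.foldl_nil] at g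
    simp only [check_attribute_conflict, check_attribute_conflict_alt, hc]
    simpa using g
  by_cases h6 : att_name = "Brown_Hair"
  · subst h6
    have hc : pvConflicts "Brown_Hair" = ["Black_Hair", "Blond_Hair", "Gray_Hair"] := by decide
    have g := branch_eq att_names ["Black_Hair", "Blond_Hair", "Gray_Hair"] ((PySem.List.index? att_names "Brown_Hair").getD 0) att_batch
    simp only [List.foldl_cons, List.foldl_nil] at g
    simp only [check_attribute_conflict, check_attribute_conflict_alt, hc]
    simpa using g
  by_cases h7 : att_name = "Gray_Hair"
  · subst h7
    have hc : pvConflicts "Gray_Hair" = ["Black_Hair", "Blond_Hair", "Brown_Hair"] := by decide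
    have g := branch_eq att_names ["Black_Hair", "Blond_Hair", "Brown_Hair"] ((PySem.List.index? att_names "Gray_Hair").getD 0) att_batch
    simp only [List.foldl_cons, List.foldl_nil] at g
    simp only [check_attribute_conflict, check_attribute_conflict_alt, hc]
    simpa using g
  by_cases h8 : att_name = "Straight_Hair"
  · subst h8
    have hc : pvConflicts "Straight_Hair" = ["Wavy_Hair"] := by decide
    have g := branch_eq att_names ["Wavy_Hair"] ((PySem.List.index? att_names "Straight_Hair").getD 0) att_batch
    simp only [List.foldl_cons, List.foldl_nil] at g
    simp only [check_attribute_conflict, check_attribute_conflict_alt, hc]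
    simpa using g
  by_cases h9 : att_name = "Wavy_Hair"
  · subst h9
    have hc : pvConflicts "Wavy_Hair" = ["Straight_Hair"] := by decide
    have g := branch_eq att_names ["Straight_Hair"] ((PySem.List.index? att_names "Wavy_Hair").getD 0) att_batch
    simp only [List.foldl_cons, List.foldl_nil] at g
    simp only [check_attribute_conflict, check_attribute_conflict_alt, hc]
    simpa using g
  · -- att_name is none of the nine names: both ports return the batch unchanged
    have hc : pvConflicts att_name = [] := by
      simp [pvConflicts, pvGroups, List.foldl, h1, h2, h3, h4, h5, h6, h7, h8, h9]
    simp [check_attribute_conflict, check_attribute_conflict_alt, hc,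
      h1, h2, h3, h4, h5, h6, h7, h8, h9, PySem.Set.ofList]

-- ===== VERDICT (by name: the statement is the Claim_ definition above) =====
theorem check_attribute_conflict_spec : Claim_equal_check_attribute_conflict := by
  intro att_batch att_name att_names _ _
  exact ports_eq att_batch att_name att_names
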